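-- pv_equiv track=rewrite | github.com/qtile/qtile | libqtile/command.py | formatSelector
-- ===== SOURCE A (Python) =====
-- def formatSelector(lst):
--     """
--         Takes a list of (name, sel) tuples, and returns a formatted
--         selector expression.
--     """
--     expr = []
--     for name, sel in iter(lst):
--         if expr:
--             expr.append(".")
--         expr.append(name)
--         if sel is not None:
--             expr.append("[%s]" % repr(sel))
--     return "".join(expr)
-- ===== SOURCE B (Python) =====
-- def formatSelector(lst):
--     out = ""
--     first = True
--     for name, sel in reversed(lst):
--         frag = name if sel is None else name + "[%s]" % repr(sel)
--         out = frag if first else frag + "." + out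
--         first = False
--     return out
-- ===== Notes on version B (the rewrite author's own statement) =====
-- stated objective: alternative
-- what changed: B traverses the list back-to-front accumulating the result string directly (prepending 'frag + "." + out'), with no intermediate fragment list and no join; A builds a flat interleaved fragment list forward with manual separator bookkeeping and joins it at the end.
import Mathlib
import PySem

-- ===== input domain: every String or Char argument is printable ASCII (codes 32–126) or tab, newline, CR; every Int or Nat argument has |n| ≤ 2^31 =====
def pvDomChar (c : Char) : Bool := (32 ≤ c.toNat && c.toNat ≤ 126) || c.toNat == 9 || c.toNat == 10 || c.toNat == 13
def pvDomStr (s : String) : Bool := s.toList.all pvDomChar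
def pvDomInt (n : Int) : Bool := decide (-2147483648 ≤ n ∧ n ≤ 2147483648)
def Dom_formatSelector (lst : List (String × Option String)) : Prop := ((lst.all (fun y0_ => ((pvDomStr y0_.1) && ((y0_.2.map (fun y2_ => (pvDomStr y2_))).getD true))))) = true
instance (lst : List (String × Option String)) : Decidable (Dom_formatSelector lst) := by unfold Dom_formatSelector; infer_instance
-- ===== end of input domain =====

-- B traverses the list back-to-front and accumulates the result string directly
-- (no intermediate fragment list, no join); A builds an interleaved fragment list
-- forward with manual separator bookkeeping and joins it (objective: alternative).

-- Python's repr() on a str, exact for strings over the Dom charset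
-- (printable ASCII plus tab/newline/CR): quote choice and the escapes
-- \\  \'  \t  \n  \r; all other Dom characters are emitted verbatim.
def pyReprStr (s : String) : String :=
  let q : Char := if s.toList.contains '\'' && !(s.toList.contains '"') then '"' else '\''
  let body := s.toList.flatMap (fun c =>
    if c = '\\' then ['\\', '\\']
    else if c = q then ['\\', q]
    else if c = '\t' then ['\\', 't']
    else if c = '\n' then ['\\', 'n']
    else if c = '\r' then ['\\', 'r']
    else [c])
  String.ofList (q :: body ++ [q])

-- ===== PORT A =====
def formatSelector (lst : List (String × Option String)) : String :=
  let expr := lst.foldl (fun expr (p : String × Option String) =>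
    let expr := if expr = ([] : List String) then expr else expr ++ ["."]
    let expr := expr ++ [p.1]
    match p.2 with
    | some sel => expr ++ ["[" ++ pyReprStr sel ++ "]"]
    | none => expr) []
  PySem.Str.join "" expr

-- ===== PORT B =====
-- state = (out, first); the loop runs over reversed(lst)
def formatSelector_alt (lst : List (String × Option String)) : String :=
  let s := lst.reverse.foldl (fun (s : String × Bool) (p : String × Option String) =>
    let frag := match p.2 with
      | none => p.1
      | some sel => p.1 ++ "[" ++ pyReprStr sel ++ "]"
    ((if s.2 then frag else frag ++ "." ++ s.1), false)) ("", true)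
  s.1

-- ===== PRECONDITION & SPEC =====
def Spec_formatSelector (lst : List (String × Option String)) (out : String) : Prop := out = formatSelector_alt lst
instance (lst : List (String × Option String)) (out : String) : Decidable (Spec_formatSelector lst out) := by unfold Spec_formatSelector; infer_instance

-- ===== CLAIM (what is proved, stated in full; the proofs are below) =====
def Claim_equal_formatSelector : Prop := ∀ (lst : List (String × Option String)), Dom_formatSelector lst → Spec_formatSelector lst (formatSelector lst)

-- ===== LEMMAS AND PROOFS =====

-- A's fragments for one tuple, and the single fragment per tuple.
def exprOf (p : String × Option String) : List String :=
  match p.2 with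
  | none => [p.1]
  | some sel => [p.1, "[" ++ pyReprStr sel ++ "]"]

def frag (p : String × Option String) : String :=
  match p.2 with
  | none => p.1
  | some sel => p.1 ++ "[" ++ pyReprStr sel ++ "]"

-- the common reference value: fragments joined by "."
def J : List (String × Option String) → String
  | [] => ""
  | [p] => frag p
  | p :: q :: rest => frag p ++ "." ++ J (q :: rest)

lemma exprOf_ne_nil (p : String × Option String) : exprOf p ≠ [] := by
  cases h : p.2 <;> simp [exprOf, h]

lemma flatten_exprOf (p : String × Option String) :
    ((exprOf p).map String.toList).flatten = (frag p).toList := by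
  cases h : p.2 <;> simp [exprOf, frag, h]

lemma stepA_eq (acc : List String) (p : String × Option String) :
    (let expr := if acc = ([] : List String) then acc else acc ++ ["."]
     let expr := expr ++ [p.1]
     match p.2 with
     | some sel => expr ++ ["[" ++ pyReprStr sel ++ "]"]
     | none => expr)
    = (if acc = [] then [] else acc ++ ["."]) ++ exprOf p := by
  cases h : p.2 <;> by_cases hacc : acc = [] <;> simp [exprOf, h, hacc]

lemma A_loop (l : List (String × Option String)) :
    ∀ (acc : List String), acc ≠ [] →
      l.foldl (fun expr (p : String × Option String) =>
        (if expr = [] then [] else expr ++ ["."]) ++ exprOf p) acc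
      = acc ++ l.flatMap (fun p => "." :: exprOf p) := by
  induction l with
  | nil => intro acc _; simp
  | cons p rest ih =>
    intro acc hacc
    have h1 : (if acc = ([] : List String) then [] else acc ++ ["."]) = acc ++ ["."] := by
      simp [hacc]
    simp only [List.foldl_cons, h1]
    rw [ih (acc ++ ["."] ++ exprOf p) (by simp)]
    simp

lemma join_empty_sep (l : List (List Char)) : PySem.Chars.join [] l = l.flatten := by
  induction l with
  | nil => simp [PySem.Chars.join_nil]
  | cons x xs ih =>
    cases xs with
    | nil => simp [PySem.Chars.join_singleton]
    | cons y ys => rw [PySem.Chars.join_cons_cons]; simp [ih]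

lemma join_dot (l : List (String × Option String)) :
    ∀ (x : List Char),
      x ++ ((l.flatMap (fun p => "." :: exprOf p)).map String.toList).flatten
      = PySem.Chars.join ['.'] (x :: (l.map frag).map String.toList) := by
  induction l with
  | nil => intro x; simp [PySem.Chars.join_singleton]
  | cons p rest ih =>
    intro x
    simp only [List.map_cons]
    rw [PySem.Chars.join_cons_cons, ← ih (frag p).toList]
    simp [flatten_exprOf]

-- A equals the fragments joined by "."
lemma A_eq_joinDot (lst : List (String × Option String)) :
    formatSelector lst = PySem.Str.join "." (lst.map frag) := by
  cases lst with
  | nil => decide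
  | cons p rest =>
    unfold formatSelector
    simp only [List.foldl_cons, stepA_eq, if_true, List.nil_append]
    rw [A_loop rest (exprOf p) (exprOf_ne_nil p)]
    simp only [PySem.Str.join]
    congr 1
    have h0 : ("".toList : List Char) = [] := by decide
    have hdot : (".".toList : List Char) = ['.'] := by decide
    rw [h0, hdot, join_empty_sep]
    simp only [List.map_cons, List.map_append]
    rw [← join_dot rest (frag p).toList]
    simp [flatten_exprOf]

-- the "."-join of the fragments at the character level is J
lemma chars_J (l : List (String × Option String)) :
    ∀ p, PySem.Chars.join ['.'] (((p :: l).map frag).map String.toList)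
      = (J (p :: l)).toList := by
  induction l with
  | nil => intro p; simp [PySem.Chars.join_singleton, J]
  | cons q rest ih =>
    intro p
    simp only [List.map_cons]
    rw [PySem.Chars.join_cons_cons]
    have := ih q
    simp only [List.map_cons] at this
    rw [this]
    simp [J]

lemma joinDot_eq_J (l : List (String × Option String)) :
    PySem.Str.join "." (l.map frag) = J l := by
  cases l with
  | nil => decide
  | cons p rest =>
    simp only [PySem.Str.join]
    have hdot : (".".toList : List Char) = ['.'] := by decide
    rw [hdot, chars_J rest p]
    simp [String.ofList]

-- B's backward fold computes J directly
lemma B_loop (l : List (String × Option String)) :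
    l.reverse.foldl (fun (s : String × Bool) (p : String × Option String) =>
      let frag := match p.2 with
        | none => p.1
        | some sel => p.1 ++ "[" ++ pyReprStr sel ++ "]"
      ((if s.2 then frag else frag ++ "." ++ s.1), false)) ("", true)
    = (J l, l.isEmpty) := by
  induction l with
  | nil => decide
  | cons p rest ih =>
    simp only [List.reverse_cons, List.foldl_append, ih, List.foldl_cons, List.foldl_nil]
    have hf : (match p.2 with
      | none => p.1
      | some sel => p.1 ++ "[" ++ pyReprStr sel ++ "]") = frag p := by
      cases h : p.2 <;> simp [frag, h]
    cases rest with
    | nil => simp [hf, J]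
    | cons q rest2 => simp [hf, J]

-- ===== VERDICT (by name: the statement is the Claim_ definition above) =====
theorem formatSelector_spec : Claim_equal_formatSelector := by
  intro lst _
  show formatSelector lst = formatSelector_alt lst
  rw [A_eq_joinDot, joinDot_eq_J]
  unfold formatSelector_alt
  simp only [B_loop]
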